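-- pv_equiv track=rewrite | github.com/TrivediAarsh51/SecuriScan | Permission.py | check_for_harmful_permissions
-- ===== SOURCE A (Python) =====
-- def check_for_harmful_permissions(permissions):
--     harmful_permissions = [
--         'android.permission.SEND_SMS',
--         'android.permission.READ_SMS',
--         'android.permission.CALL_PHONE',
--         'android.permission.CHANGE_NETWORK_STATE',
--         'android.permission.WRITE_SETTINGS',
--         'android.permission.CAMERA',
--         'android.permission.USE_FINGERPRINT',
--         'android.permission.USE_CREDENTIALS',
--         'android.permission.READ_MEDIA_VIDEO',
--         'android.permission.READ_MEDIA_IMAGES'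
--         # Add more harmful permissions here as needed
--     ]
--
--     harmful_permissions_found = []
--
--     for permission in permissions:
--         for harmful_permission in harmful_permissions:
--             if harmful_permission in permission:
--                 harmful_permissions_found.append(permission)
--                 break
--
--     return harmful_permissions_found
-- ===== SOURCE B (Python) =====
-- _HARMFUL = [
--     'android.permission.SEND_SMS',
--     'android.permission.READ_SMS',
--     'android.permission.CALL_PHONE',
--     'android.permission.CHANGE_NETWORK_STATE',
--     'android.permission.WRITE_SETTINGS',
--     'android.permission.CAMERA',
--     'android.permission.USE_FINGERPRINT',
--     'android.permission.USE_CREDENTIALS',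
--     'android.permission.READ_MEDIA_VIDEO',
--     'android.permission.READ_MEDIA_IMAGES',
-- ]
--
-- def check_for_harmful_permissions(permissions):
--     # transposed traversal: for each blacklist entry, mark the indices it hits,
--     # then gather the marked permissions in input order
--     matched = set()
--     for harmful in _HARMFUL:
--         for i, permission in enumerate(permissions):
--             if harmful in permission:
--                 matched.add(i)
--     return [p for i, p in enumerate(permissions) if i in matched]
-- ===== Notes on version B (the rewrite author's own statement) =====
-- stated objective: alternative
-- what changed: Transposes the loop nest (blacklist outer, permissions inner, no break), accumulating a set of matched indices, and produces the result in a separate final gather pass over enumerate(permissions); A loops permission-outer with an inner blacklist scan that appends and breaks on first hit.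
import Mathlib
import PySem

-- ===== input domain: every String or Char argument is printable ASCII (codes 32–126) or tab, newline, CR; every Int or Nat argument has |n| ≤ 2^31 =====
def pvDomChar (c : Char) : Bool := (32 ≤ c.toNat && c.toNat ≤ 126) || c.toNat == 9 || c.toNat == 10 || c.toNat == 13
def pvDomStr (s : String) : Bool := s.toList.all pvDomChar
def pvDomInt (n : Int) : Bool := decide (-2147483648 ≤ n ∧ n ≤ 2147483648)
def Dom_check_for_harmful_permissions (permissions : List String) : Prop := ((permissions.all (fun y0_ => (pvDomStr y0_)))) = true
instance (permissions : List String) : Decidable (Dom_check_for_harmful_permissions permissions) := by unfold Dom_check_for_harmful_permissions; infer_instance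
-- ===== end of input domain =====

-- B transposes A's loop nest (blacklist outer) into a matched-index set plus a final gather pass (alternative); same return value.


-- ===== PORT A =====
-- the blacklist literal, shared verbatim by both ports (same-module constant in Source B too)
def harmfulPermissions : List String :=
  [ "android.permission.SEND_SMS",
    "android.permission.READ_SMS",
    "android.permission.CALL_PHONE",
    "android.permission.CHANGE_NETWORK_STATE",
    "android.permission.WRITE_SETTINGS",
    "android.permission.CAMERA",
    "android.permission.USE_FINGERPRINT",
    "android.permission.USE_CREDENTIALS",
    "android.permission.READ_MEDIA_VIDEO",
    "android.permission.READ_MEDIA_IMAGES" ]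

-- A's inner 'for harmful_permission in harmful_permissions: if …: append; break'
def innerLoopA (hs : List String) (permission : String) (acc : List String) : List String :=
  match hs with
  | [] => acc
  | h :: rest =>
      if PySem.Str.isIn h permission then acc ++ [permission]   -- append then break
      else innerLoopA rest permission acc

def check_for_harmful_permissions (permissions : List String) : List String :=
  permissions.foldl (fun acc p => innerLoopA harmfulPermissions p acc) []

-- ===== PORT B =====
-- Source B's inner 'for i, permission in enumerate(permissions): if harmful in permission: matched.add(i)'
def markMatches (permissions : List String) (harmful : String) (matched : PySem.Set Int) : PySem.Set Int :=
  (PySem.List.enumerate permissions).foldl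
    (fun s ip => if PySem.Str.isIn harmful ip.2 then PySem.Set.add s ip.1 else s) matched

-- Source B: blacklist-outer marking of matched indices, then a gather pass '[p for i, p in enumerate(permissions) if i in matched]'
def check_for_harmful_permissions_alt (permissions : List String) : List String :=
  let matched := harmfulPermissions.foldl (fun s h => markMatches permissions h s) PySem.Set.empty
  ((PySem.List.enumerate permissions).filter
      (fun ip => PySem.Set.contains matched ip.1)).map (fun ip => ip.2)

-- ===== PRECONDITION & SPEC =====
def Spec_check_for_harmful_permissions (permissions : List String) (out : List String) : Prop := out = check_for_harmful_permissions_alt permissions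
instance (permissions : List String) (out : List String) : Decidable (Spec_check_for_harmful_permissions permissions out) := by unfold Spec_check_for_harmful_permissions; infer_instance

-- ===== CLAIM (what is proved, stated in full; the proofs are below) =====
def Claim_equal_check_for_harmful_permissions : Prop := ∀ (permissions : List String), Dom_check_for_harmful_permissions permissions → Spec_check_for_harmful_permissions permissions (check_for_harmful_permissions permissions)

-- ===== LEMMAS AND PROOFS =====
-- A's inner loop-with-break is 'append iff some blacklist entry matches'
theorem innerLoopA_eq (hs : List String) (p : String) (acc : List String) :
    innerLoopA hs p acc = if hs.any (fun h => PySem.Str.isIn h p) then acc ++ [p] else acc := by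
  induction hs with
  | nil => simp [innerLoopA]
  | cons h rest ih =>
      cases hc : PySem.Chars.isIn h.toList p.toList <;> simp [innerLoopA, hc, ih]

-- a conditional-add fold is an unconditional-add fold over the filtered list
theorem foldl_ite_add_eq_filter {α β : Type} [BEq β] (l : List α) (p : α → Bool) (f : α → β)
    (s : PySem.Set β) :
    l.foldl (fun s x => if p x then PySem.Set.add s (f x) else s) s
      = (l.filter p).foldl (fun s x => PySem.Set.add s (f x)) s := by
  induction l generalizing s with
  | nil => rfl
  | cons x xs ih => cases hp : p x <;> simp [hp, ih]

-- membership in the fully built matched set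
theorem mem_matched (permissions : List String) (i : Int) (s : PySem.Set Int) (hs : List String) :
    i ∈ hs.foldl (fun s h => markMatches permissions h s) s
      ↔ i ∈ s ∨ ∃ ip ∈ PySem.List.enumerate permissions,
          ip.1 = i ∧ hs.any (fun h => PySem.Str.isIn h ip.2) := by
  induction hs generalizing s with
  | nil => simp
  | cons h rest ih =>
      rw [List.foldl_cons, ih]
      unfold markMatches
      rw [foldl_ite_add_eq_filter]
      rw [PySem.Set.mem_foldl_add]
      constructor
      · rintro ((hi | ⟨ip, hip, rfl⟩) | ⟨ip, hip, h1, h2⟩)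
        · exact Or.inl hi
        · rw [List.mem_filter] at hip
          exact Or.inr ⟨ip, hip.1, rfl, by simp only [List.any_cons, Bool.or_eq_true]; exact Or.inl (by simpa using hip.2)⟩
        · exact Or.inr ⟨ip, hip, h1, by simp_all⟩
      · rintro (hi | ⟨ip, hip, h1, h2⟩)
        · exact Or.inl (Or.inl hi)
        · simp only [List.any_cons, Bool.or_eq_true] at h2
          rcases h2 with h2 | h2
          · exact Or.inl (Or.inr ⟨ip, List.mem_filter.mpr ⟨hip, h2⟩, h1.symm⟩)
          · exact Or.inr ⟨ip, hip, h1, h2⟩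

-- the gather over enumerate with a per-element predicate on the value is List.filter
theorem map_snd_filter_enumerate (permissions : List String) (q : String → Bool) (s : Int) :
    ((PySem.List.enumerate permissions s).filter (fun ip => q ip.2)).map (fun ip => ip.2)
      = permissions.filter q := by
  induction permissions generalizing s with
  | nil => rfl
  | cons x xs ih =>
      rw [PySem.List.enumerate_cons]
      cases hq : q x <;> simp [hq, ih]

-- ===== VERDICT (by name: the statement is the Claim_ definition above) =====
theorem check_for_harmful_permissions_spec : Claim_equal_check_for_harmful_permissions := by
  intro permissions _
  unfold Spec_check_for_harmful_permissions check_for_harmful_permissions check_for_harmful_permissions_alt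
  simp only [innerLoopA_eq]
  rw [PySem.List.foldl_append_if_eq_filter, List.nil_append]
  rw [← map_snd_filter_enumerate permissions
        (fun p => harmfulPermissions.any (fun h => PySem.Str.isIn h p)) 0]
  congr 1
  refine List.filter_congr ?_
  intro ip hip
  obtain ⟨k, hk, rfl⟩ := (PySem.List.mem_enumerate_iff _ _ _).mp hip
  rw [Bool.eq_iff_iff, PySem.Set.contains_iff, mem_matched]
  constructor
  · intro h
    exact Or.inr ⟨((0:Int) + k, permissions[k]), (PySem.List.mem_enumerate_iff _ _ _).mpr ⟨k, hk, rfl⟩, rfl, h⟩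
  · rintro (h | ⟨ip2, hip2, h1, h2⟩)
    · exact absurd h (List.not_mem_nil)
    · obtain ⟨k2, hk2, rfl⟩ := (PySem.List.mem_enumerate_iff _ _ _).mp hip2
      have hkk : k2 = k := by
        simp only at h1
        omega
      subst hkk
      exact h2
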